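-- pv_equiv track=rewrite | github.com/23f3001929/TDS_proj2_LLM | app/solver.py | _find_submit_url_from_anchors
-- ===== SOURCE A (Python) =====
-- def _find_submit_url_from_anchors(anchors):
--     """Return the first href containing 'submit', else the first href, else None."""
--     for h in anchors:
--         if h and "submit" in h.lower():
--             return h
--     for h in anchors:
--         if h:
--             return h
--     return None
-- ===== SOURCE B (Python) =====
-- def _find_submit_url_from_anchors(anchors):
--     """Return the first href containing 'submit', else the first href, else None."""
--     first = None
--     for h in anchors:
--         if not h:
--             continue
--         if "submit" in h.lower():
--             return h
--         if first is None:
--             first = h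
--     return first
-- ===== Notes on version B (the rewrite author's own statement) =====
-- stated objective: simpler
-- what changed: Fused A's two scans over the anchors into a single pass that returns a submit-containing href immediately and otherwise remembers the first non-empty href in a variable.
import Mathlib
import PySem

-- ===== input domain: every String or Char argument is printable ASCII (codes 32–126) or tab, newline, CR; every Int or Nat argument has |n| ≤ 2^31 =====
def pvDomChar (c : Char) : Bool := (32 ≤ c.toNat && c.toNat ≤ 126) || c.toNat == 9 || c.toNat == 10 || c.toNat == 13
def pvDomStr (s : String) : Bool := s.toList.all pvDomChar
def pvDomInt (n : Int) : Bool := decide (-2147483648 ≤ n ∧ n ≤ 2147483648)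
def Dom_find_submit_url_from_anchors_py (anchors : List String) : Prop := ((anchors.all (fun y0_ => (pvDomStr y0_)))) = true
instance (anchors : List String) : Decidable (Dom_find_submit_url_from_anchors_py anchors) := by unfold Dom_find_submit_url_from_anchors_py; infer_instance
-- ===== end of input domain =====

-- B fuses A's two scans into one pass; objective: simpler (same O(n) cost).

-- ===== PORT A =====
-- first loop: return h if h truthy and "submit" in h.lower()
def pvALoop1 : List String → Option String
  | [] => none
  | h :: t =>
    if h ≠ "" ∧ PySem.Str.isIn "submit" (PySem.Str.lower h) = true then some h
    else pvALoop1 t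

-- second loop: return first truthy h
def pvALoop2 : List String → Option String
  | [] => none
  | h :: t => if h ≠ "" then some h else pvALoop2 t

def find_submit_url_from_anchors_py (anchors : List String) : Option String :=
  match pvALoop1 anchors with
  | some h => some h
  | none => pvALoop2 anchors

-- ===== PORT B =====
-- single pass carrying `first` (the first non-empty href seen so far)
def pvBLoop : List String → Option String → Option String
  | [], first => first
  | h :: t, first =>
    if h = "" then pvBLoop t first          -- "if not h: continue"
    else if PySem.Str.isIn "submit" (PySem.Str.lower h) = true then some h
    else pvBLoop t (match first with | none => some h | some f => some f)

def find_submit_url_from_anchors_py_alt (anchors : List String) : Option String :=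
  pvBLoop anchors none

-- ===== PRECONDITION & SPEC =====
def Spec_find_submit_url_from_anchors_py (anchors : List String) (out : Option String) : Prop := out = find_submit_url_from_anchors_py_alt anchors
instance (anchors : List String) (out : Option String) : Decidable (Spec_find_submit_url_from_anchors_py anchors out) := by unfold Spec_find_submit_url_from_anchors_py; infer_instance

-- ===== CLAIM (what is proved, stated in full; the proofs are below) =====
def Claim_equal_find_submit_url_from_anchors_py : Prop := ∀ (anchors : List String), Dom_find_submit_url_from_anchors_py anchors → Spec_find_submit_url_from_anchors_py anchors (find_submit_url_from_anchors_py anchors)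

-- ===== LEMMAS AND PROOFS =====
-- Loop invariant: the single pass equals "first submit hit, else the carried first, else first non-empty".
theorem pvBLoop_eq (anchors : List String) : ∀ (first : Option String),
    pvBLoop anchors first =
      match pvALoop1 anchors with
      | some h => some h
      | none => match first with | some f => some f | none => pvALoop2 anchors := by
  induction anchors with
  | nil => intro first; cases first <;> simp [pvBLoop, pvALoop1, pvALoop2]
  | cons h t ih =>
    intro first
    by_cases he : h = ""
    · subst he
      simp only [pvBLoop, pvALoop1, pvALoop2, ne_eq, not_true_eq_false, false_and, if_false]
      rw [ih first]
      simp
    · by_cases hs : PySem.Str.isIn "submit" (PySem.Str.lower h) = true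
      · have hc : h ≠ "" ∧ PySem.Str.isIn "submit" (PySem.Str.lower h) = true := ⟨he, hs⟩
        simp only [pvBLoop, pvALoop1, if_neg he, if_pos hs, if_pos hc]
      · simp only [pvBLoop, pvALoop1, pvALoop2, if_neg he, if_neg hs]
        have : ¬ (h ≠ "" ∧ PySem.Str.isIn "submit" (PySem.Str.lower h) = true) := by
          intro ⟨_, c⟩; exact hs c
        rw [if_neg this, ih]
        cases first <;> simp [he]

-- ===== VERDICT (by name: the statement is the Claim_ definition above) =====
theorem find_submit_url_from_anchors_py_spec : Claim_equal_find_submit_url_from_anchors_py := by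
  intro anchors _
  unfold Spec_find_submit_url_from_anchors_py find_submit_url_from_anchors_py find_submit_url_from_anchors_py_alt
  rw [pvBLoop_eq]
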